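-- pv_equiv track=rewrite | github.com/Sebastianjaimes-sepc/Metahuristica | src/encoding_v2.py | decode_vector_v2
-- ===== SOURCE A (Python) =====
-- from typing import List, Tuple
--
-- DEPOT = 0
--
-- def decode_vector_v2(vector: List[int]) -> List[List[int]]:
--     """
--     Convierte vector con delimitadores en lista de rutas.
--
--     Args:
--         vector: [0, 1, 3, 5, 0, 2, 4, 0, 6, 0]
--
--     Returns:
--         routes: [[1,3,5], [2,4], [6]]
--     """
--     routes = []
--     current_route = []
--
--     for node in vector:
--         if node == DEPOT:
--             if current_route:  # Si hay clientes en la ruta actual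
--                 routes.append(current_route)
--                 current_route = []
--         else:
--             current_route.append(node)
--
--     return routes
-- ===== SOURCE B (Python) =====
-- from typing import List, Tuple
--
-- DEPOT = 0
--
-- def decode_vector_v2(vector: List[int]) -> List[List[int]]:
--     # Peel off one depot-terminated segment at a time with list.index,
--     # instead of scanning node by node with an accumulator.
--     routes = []
--     rest = vector
--     while DEPOT in rest:
--         cut = rest.index(DEPOT)
--         if cut:
--             routes.append(rest[:cut])
--         rest = rest[cut + 1:]
--     return routes
-- ===== Notes on version B (the rewrite author's own statement) =====
-- stated objective: alternative
-- what changed: B repeatedly locates the next depot with list.index and slices off whole segments, instead of A's node-by-node loop with a current-route accumulator; the trailing un-terminated run is dropped naturally because only depot-terminated prefixes are ever sliced off.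
import Mathlib
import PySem

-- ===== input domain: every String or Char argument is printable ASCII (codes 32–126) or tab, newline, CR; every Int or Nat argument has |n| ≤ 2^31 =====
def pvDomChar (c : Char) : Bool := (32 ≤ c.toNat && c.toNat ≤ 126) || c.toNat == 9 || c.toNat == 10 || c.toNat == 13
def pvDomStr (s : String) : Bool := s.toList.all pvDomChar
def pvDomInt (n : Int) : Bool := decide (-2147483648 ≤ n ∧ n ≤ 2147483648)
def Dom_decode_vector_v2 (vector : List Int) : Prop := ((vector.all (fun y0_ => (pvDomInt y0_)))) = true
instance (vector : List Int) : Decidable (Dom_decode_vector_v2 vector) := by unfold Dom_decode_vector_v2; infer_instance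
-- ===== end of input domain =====

-- B peels off one depot-terminated segment at a time with list.index instead of A's
-- node-by-node accumulator loop (objective: alternative decomposition, same cost class).

-- ===== PORT A =====
-- A's loop state: (routes, current_route); Python truthiness `if current_route:` is `≠ []`.
def decode_vector_v2 (vector : List Int) : List (List Int) :=
  (vector.foldl
    (fun st node =>
      if node == 0 then
        if st.2 ≠ [] then (st.1 ++ [st.2], ([] : List Int)) else st
      else
        (st.1, st.2 ++ [node]))
    (([] : List (List Int)), ([] : List Int))).1

-- ===== PORT B =====
-- Source B's while-loop: `rest[:cut]` with cut = rest.index(0) ≥ 0 is `take cut`,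
-- `rest[cut+1:]` is `drop (cut+1)` (both exact for nonnegative indices); `if cut:` is `cut ≠ 0`.
def decode_vector_v2_altLoop (routes : List (List Int)) (rest : List Int) : List (List Int) :=
  if rest.contains 0 then
    match h : PySem.List.index? rest 0 with
    | none => routes  -- unreachable: 0 ∈ rest
    | some cut =>
        decode_vector_v2_altLoop
          (if cut ≠ 0 then routes ++ [rest.take cut] else routes)
          (rest.drop (cut + 1))
  else routes
termination_by rest.length
decreasing_by
  have hne : rest ≠ [] := by rintro rfl; simp at *
  have : 0 < rest.length := List.length_pos_iff.mpr hne
  simp [List.length_drop]; omega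

def decode_vector_v2_alt (vector : List Int) : List (List Int) :=
  decode_vector_v2_altLoop [] vector

-- ===== PRECONDITION & SPEC =====
def Spec_decode_vector_v2 (vector : List Int) (out : List (List Int)) : Prop := out = decode_vector_v2_alt vector
instance (vector : List Int) (out : List (List Int)) : Decidable (Spec_decode_vector_v2 vector out) := by unfold Spec_decode_vector_v2; infer_instance

-- ===== CLAIM (what is proved, stated in full; the proofs are below) =====
def Claim_equal_decode_vector_v2 : Prop := ∀ (vector : List Int), Dom_decode_vector_v2 vector → Spec_decode_vector_v2 vector (decode_vector_v2 vector)

-- ===== LEMMAS AND PROOFS =====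

-- On a ahead-of-depot-free list, B's loop stops immediately.
theorem altLoop_no_zero (routes : List (List Int)) (cur : List Int)
    (hcur : ∀ x ∈ cur, x ≠ (0 : Int)) :
    decode_vector_v2_altLoop routes cur = routes := by
  rw [decode_vector_v2_altLoop]
  have : cur.contains 0 = false := by
    simp only [List.contains_eq_mem, decide_eq_false_iff_not]
    intro hmem; exact hcur 0 hmem rfl
  rw [this]; simp

theorem index?_append_zero (cur t : List Int) (hcur : ∀ x ∈ cur, x ≠ (0 : Int)) :
    PySem.List.index? (cur ++ 0 :: t) 0 = some cur.length := by
  rw [PySem.List.index?_eq_some_iff]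
  exact ⟨cur, t, rfl, rfl, fun h => hcur 0 h rfl⟩

-- B's loop applied to `cur ++ 0 :: t` (cur depot-free) flushes cur and continues on t.
theorem altLoop_step (routes : List (List Int)) (cur t : List Int)
    (hcur : ∀ x ∈ cur, x ≠ (0 : Int)) :
    decode_vector_v2_altLoop routes (cur ++ 0 :: t)
      = decode_vector_v2_altLoop (if cur ≠ [] then routes ++ [cur] else routes) t := by
  rw [decode_vector_v2_altLoop]
  have hc : (cur ++ 0 :: t).contains 0 = true := by
    simp [List.contains_eq_mem]
  rw [if_pos hc]
  rw [index?_append_zero cur t hcur]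
  have htake : (cur ++ 0 :: t).take cur.length = cur := by
    simp
  have hdrop : (cur ++ 0 :: t).drop (cur.length + 1) = t := by
    simp
  simp only [htake, hdrop]
  congr 1
  by_cases h : cur = []
  · simp [h]
  · have : cur.length ≠ 0 := by simpa [List.length_eq_zero_iff] using h
    simp [h, this]

-- Invariant tying A's fold state (routes, cur) to B's loop on `cur ++ rest`.
theorem fold_eq_altLoop (rest : List Int) :
    ∀ (routes : List (List Int)) (cur : List Int), (∀ x ∈ cur, x ≠ (0 : Int)) →
    (rest.foldl
      (fun st node =>
        if node == 0 then
          if st.2 ≠ [] then (st.1 ++ [st.2], ([] : List Int)) else st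
        else
          (st.1, st.2 ++ [node]))
      (routes, cur)).1
      = decode_vector_v2_altLoop routes (cur ++ rest) := by
  induction rest with
  | nil =>
    intro routes cur hcur
    simp [altLoop_no_zero routes cur hcur]
  | cons n t ih =>
    intro routes cur hcur
    by_cases hn : n = 0
    · subst hn
      rw [altLoop_step routes cur t hcur]
      simp only [List.foldl_cons, beq_self_eq_true, if_pos]
      by_cases h : cur = []
      · simp only [h, ne_eq, not_true_eq_false, if_false, ite_not]
        simpa using ih routes [] (by simp)
      · simp only [ne_eq, h, not_false_eq_true, if_pos]
        simpa [h] using ih (routes ++ [cur]) [] (by simp)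
    · have hb : (n == (0 : Int)) = false := by simp [hn]
      simp only [List.foldl_cons, hb, Bool.false_eq_true, if_false]
      simpa using ih routes (cur ++ [n]) (by
        intro x hx
        rcases List.mem_append.mp hx with h1 | h2
        · exact hcur x h1
        · simp at h2; subst h2; exact hn)

-- ===== VERDICT (by name: the statement is the Claim_ definition above) =====
theorem decode_vector_v2_spec : Claim_equal_decode_vector_v2 := by
  intro vector _
  unfold Spec_decode_vector_v2 decode_vector_v2 decode_vector_v2_alt
  simpa using fold_eq_altLoop vector [] [] (by simp)
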